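-- pv_equiv track=rewrite | github.com/lenkaB/botornot | util.py | ttr_curve
-- ===== SOURCE A (Python) =====
-- def ttr_curve(tweet_tokens):
--     unique_tokens = []
--     curve = []
--     for token in tweet_tokens:
--         if token not in unique_tokens:
--             unique_tokens.append(token)
--             if len(curve) == 0:
--                 curve.append(1)
--             else:
--                 curve.append(curve[len(curve)-1]+1)
--         else: curve.append(curve[len(curve)-1])
--     return curve
-- ===== SOURCE B (Python) =====
-- def ttr_curve(tweet_tokens):
--     # Two separated passes: O(1) set-membership indicator build, then a prefix sum.
--     seen = set()
--     firsts = []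
--     for t in tweet_tokens:
--         firsts.append(t not in seen)
--         seen.add(t)
--     curve = []
--     total = 0
--     for f in firsts:
--         total += f
--         curve.append(total)
--     return curve
-- ===== Notes on version B (the rewrite author's own statement) =====
-- stated objective: faster
-- what changed: Replaces the single branching loop that scans a growing list for membership and reads back the curve's last element with two passes: build a boolean first-occurrence indicator using a hash set, then take its prefix sums.
import Mathlib
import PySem

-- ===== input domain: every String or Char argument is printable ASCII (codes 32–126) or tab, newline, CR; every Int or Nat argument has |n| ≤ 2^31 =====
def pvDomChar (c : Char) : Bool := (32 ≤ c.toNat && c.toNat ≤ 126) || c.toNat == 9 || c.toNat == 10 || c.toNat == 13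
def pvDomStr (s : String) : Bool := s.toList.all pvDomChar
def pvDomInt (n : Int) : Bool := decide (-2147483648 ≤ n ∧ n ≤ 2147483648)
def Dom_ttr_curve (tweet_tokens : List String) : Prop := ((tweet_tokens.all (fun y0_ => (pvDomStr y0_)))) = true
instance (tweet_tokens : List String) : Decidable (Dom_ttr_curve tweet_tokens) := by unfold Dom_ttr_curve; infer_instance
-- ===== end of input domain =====

-- B separates the work into a first-occurrence indicator pass (hash set) plus a prefix-sum pass,
-- replacing A's single branching loop with list-membership scans; objective: faster.

-- ===== PORT A =====
-- curve[len(curve)-1] (with .getD 0, exact: the index is always in range when A reaches it)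
def lastD0 (curve : List Int) : Int := (PySem.List.pyGet? curve ((curve.length : Int) - 1)).getD 0

-- loop body of A: state (unique_tokens, curve)
def ttr_curve_go (unique_tokens : List String) (curve : List Int) : List String → List Int
  | [] => curve
  | token :: rest =>
    if unique_tokens.contains token = false then
      let curve' :=
        if curve.length == 0 then curve ++ [1]
        else curve ++ [lastD0 curve + 1]
      ttr_curve_go (unique_tokens ++ [token]) curve' rest
    else
      ttr_curve_go unique_tokens (curve ++ [lastD0 curve]) rest

def ttr_curve (tweet_tokens : List String) : List Int :=
  ttr_curve_go [] [] tweet_tokens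

-- ===== PORT B =====
-- first pass: firsts[i] = (tweet_tokens[i] not in seen), seen a Python set
def ttr_firsts (seen : PySem.Set String) : List String → List Bool
  | [] => []
  | t :: ts => (!(PySem.Set.contains seen t)) :: ttr_firsts (PySem.Set.add seen t) ts

-- second pass: prefix sums of the indicators (True counts as 1)
def ttr_prefix (total : Int) : List Bool → List Int
  | [] => []
  | f :: fs =>
    let total' := total + (if f then 1 else 0)
    total' :: ttr_prefix total' fs

def ttr_curve_alt (tweet_tokens : List String) : List Int :=
  ttr_prefix 0 (ttr_firsts PySem.Set.empty tweet_tokens)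

-- ===== PRECONDITION & SPEC =====
def Spec_ttr_curve (tweet_tokens : List String) (out : List Int) : Prop := out = ttr_curve_alt tweet_tokens
instance (tweet_tokens : List String) (out : List Int) : Decidable (Spec_ttr_curve tweet_tokens out) := by unfold Spec_ttr_curve; infer_instance

-- ===== CLAIM (what is proved, stated in full; the proofs are below) =====
def Claim_equal_ttr_curve : Prop := ∀ (tweet_tokens : List String), Dom_ttr_curve tweet_tokens → Spec_ttr_curve tweet_tokens (ttr_curve tweet_tokens)

-- ===== LEMMAS AND PROOFS =====

theorem lastD0_nil : lastD0 [] = 0 := by decide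

theorem lastD0_append (xs : List Int) (x : Int) : lastD0 (xs ++ [x]) = x := by
  unfold lastD0
  have h : ((xs ++ [x]).length : Int) - 1 = ((xs.length : Nat) : Int) := by
    simp
  rw [h, PySem.List.pyGet?_natCast]
  simp

-- main invariant: with membership-equal states, A's loop emits
-- curve ++ (B's prefix sums, continued from curve's last element, of B's indicators)
theorem go_eq (ts : List String) :
    ∀ (unique : List String) (seen : PySem.Set String) (curve : List Int),
      (∀ u, u ∈ unique ↔ u ∈ seen) →
      ttr_curve_go unique curve ts = curve ++ ttr_prefix (lastD0 curve) (ttr_firsts seen ts) := by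
  induction ts with
  | nil => intro unique seen curve _; simp [ttr_curve_go, ttr_firsts, ttr_prefix]
  | cons t rest ih =>
    intro unique seen curve hmem
    by_cases h : t ∈ seen
    · -- token already seen: A's else branch, B's indicator false
      have hsc : PySem.Set.contains seen t = true := by simp [PySem.Set.contains, h]
      have hA : unique.contains t = true := by simpa using (hmem t).mpr h
      have hadd : PySem.Set.add seen t = seen := by simp [PySem.Set.add, h]
      rw [ttr_curve_go, if_neg (by simpa using hA)]
      rw [ih unique seen (curve ++ [lastD0 curve]) hmem]
      rw [ttr_firsts, hsc, hadd]
      simp [ttr_prefix, lastD0_append, List.append_assoc]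
    · -- new token: A's then branch, B's indicator true
      have hsc : PySem.Set.contains seen t = false := by simp [PySem.Set.contains, h]
      have hA : unique.contains t = false := by
        simpa using fun hh => h ((hmem t).mp hh)
      have hc : (if curve.length == 0 then curve ++ [1]
          else curve ++ [lastD0 curve + 1]) = curve ++ [lastD0 curve + 1] := by
        by_cases hc0 : curve = []
        · subst hc0; simp [lastD0_nil]
        · simp [List.length_eq_zero_iff, hc0]
      have hm' : ∀ u, u ∈ unique ++ [t] ↔ u ∈ PySem.Set.add seen t := by
        intro u; simp [PySem.Set.mem_add, hmem u]
      rw [ttr_curve_go, if_pos hA]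
      show ttr_curve_go (unique ++ [t]) _ rest = _
      rw [hc, ih (unique ++ [t]) (PySem.Set.add seen t) (curve ++ [lastD0 curve + 1]) hm']
      rw [ttr_firsts, hsc]
      simp [ttr_prefix, lastD0_append, List.append_assoc]

-- ===== VERDICT (by name: the statement is the Claim_ definition above) =====
theorem ttr_curve_spec : Claim_equal_ttr_curve := by
  intro ts _
  unfold Spec_ttr_curve ttr_curve ttr_curve_alt
  have h := go_eq ts [] PySem.Set.empty [] (by intro u; simp [PySem.Set.empty])
  rw [h, lastD0_nil]
  rfl
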